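-- pv_equiv track=rewrite | github.com/paulauus/Advent-of-Code | 2024/day_5.py | get_updates
-- ===== SOURCE A (Python) =====
-- def get_updates(sections: list[str]) -> list[list[int]]:
--     """Returns the updates as lists of integers."""
--     updates = []
--     parsing = False
--
--     for line in sections:
--         if line == "":
--             parsing = True
--             continue
--         if parsing:
--             # Split and convert to integers
--             updates.append(list(map(int, line.split(","))))
--
--     return updates
-- ===== SOURCE B (Python) =====
-- def get_updates(sections: list[str]) -> list[list[int]]:
--     """Returns the updates as lists of integers."""
--     # Stage 1: split the lines into blank-separated groups.
--     groups = [[]]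
--     for line in sections:
--         if line == "":
--             groups.append([])
--         else:
--             groups[-1].append(line)
--     # Stage 2: parse and flatten every group after the first.
--     return [[int(t) for t in line.split(",")] for g in groups[1:] for line in g]
-- ===== Notes on version B (the rewrite author's own statement) =====
-- stated objective: alternative
-- what changed: B is a two-stage pipeline: it first splits the lines into blank-separated groups, then parses and flattens every group after the first, instead of A's single scan carrying a per-line boolean flag.
import Mathlib
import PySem

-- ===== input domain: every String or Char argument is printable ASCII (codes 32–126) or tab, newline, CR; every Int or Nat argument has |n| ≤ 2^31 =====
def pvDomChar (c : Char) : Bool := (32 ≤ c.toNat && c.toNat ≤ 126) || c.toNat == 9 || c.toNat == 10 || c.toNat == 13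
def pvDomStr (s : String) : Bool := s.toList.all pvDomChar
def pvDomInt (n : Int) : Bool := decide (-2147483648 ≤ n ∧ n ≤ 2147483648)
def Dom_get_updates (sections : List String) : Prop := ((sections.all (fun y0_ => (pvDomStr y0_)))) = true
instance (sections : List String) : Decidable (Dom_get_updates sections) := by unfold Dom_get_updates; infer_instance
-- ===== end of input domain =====

-- B replaces A's single flag-carrying scan by a two-stage pipeline (split into
-- blank-separated groups, then parse and flatten the groups after the first); objective: alternative.

-- shared atomic helper: parsing one line into ints ([int(t) for t in line.split(",")]);
-- under Pre_ every token parses, so the getD 0 default is never taken on admitted inputs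
def pvParseLine (line : String) : List Int :=
  ((PySem.Str.split? line ",").getD []).map (fun t => (PySem.Int.ofStr? t).getD 0)

-- ===== PORT A =====
-- the for-loop over `sections` carrying the `parsing` flag, appending parsed lines in order
def pvGoA : List String → Bool → List (List Int)
  | [], _ => []
  | l :: ls, parsing =>
    if l = "" then pvGoA ls true
    else if parsing then pvParseLine l :: pvGoA ls parsing
    else pvGoA ls parsing

def get_updates (sections : List String) : List (List Int) :=
  pvGoA sections false

-- ===== PORT B =====
-- stage 1: the grouping loop (groups.append([]) on a blank line, groups[-1].append(line) otherwise)
def pvGroups : List String → List (List String) → List (List String)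
  | [], gs => gs
  | l :: ls, gs =>
    if l = "" then pvGroups ls (gs ++ [[]])
    else pvGroups ls (gs.dropLast ++ [(gs.getLast?.getD []) ++ [l]])

def get_updates_alt (sections : List String) : List (List Int) :=
  -- stage 2: the nested comprehension over groups[1:]
  ((pvGroups sections [[]]).drop 1).flatMap (fun g => g.map pvParseLine)

-- ===== PRECONDITION & SPEC =====
-- Pre_ excludes exactly the inputs on which Python A raises ValueError: a nonempty line after
-- the first blank line containing a comma-separated token that int() rejects.
def Pre_get_updates (sections : List String) : Prop :=
  ∀ l ∈ sections.drop (((PySem.List.index? sections "").getD sections.length) + 1),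
    l ≠ "" → ∀ t ∈ (PySem.Str.split? l ",").getD [], (PySem.Int.ofStr? t).isSome
instance (sections : List String) : Decidable (Pre_get_updates sections) := by
  unfold Pre_get_updates; infer_instance

def pvWitness_get_updates : List String := ["13|42", "", "1,2,3", "", "-7, 8"]

def Spec_get_updates (sections : List String) (out : List (List Int)) : Prop := out = get_updates_alt sections
instance (sections : List String) (out : List (List Int)) : Decidable (Spec_get_updates sections out) := by unfold Spec_get_updates; infer_instance

-- ===== CLAIM (what is proved, stated in full; the proofs are below) =====
def Claim_equal_get_updates : Prop := ∀ (sections : List String), Dom_get_updates sections → Pre_get_updates sections → Spec_get_updates sections (get_updates sections)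

-- ===== LEMMAS AND PROOFS =====

-- the grouping loop only ever extends the last group: finished groups pass through
theorem pvGroups_append (ls : List String) :
    ∀ (gs : List (List String)) (g : List String),
      pvGroups ls (gs ++ [g]) = gs ++ pvGroups ls [g] := by
  induction ls with
  | nil => intro gs g; rfl
  | cons l ls ih =>
      intro gs g
      by_cases h : l = ""
      · simp only [pvGroups, h, reduceIte]
        rw [ih (gs ++ [g]) [], ih [g] [], List.append_assoc]
      · simp only [pvGroups, h, reduceIte]
        rw [show (gs ++ [g]).dropLast ++ [((gs ++ [g]).getLast?.getD []) ++ [l]]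
              = gs ++ [g ++ [l]] from by simp,
            ih gs (g ++ [l]),
            show ([g] : List (List String)).dropLast ++ [(([g] : List (List String)).getLast?.getD []) ++ [l]]
              = [g ++ [l]] from by simp]

-- after the first blank line, A's flag is set: the remaining groups flatten to A's tail output
theorem pvGroups_flatten_true (ls : List String) :
    ∀ (g : List String),
      (pvGroups ls [g]).flatMap (fun grp => grp.map pvParseLine)
        = g.map pvParseLine ++ pvGoA ls true := by
  induction ls with
  | nil => intro g; simp [pvGroups, pvGoA]
  | cons l ls ih =>
      intro g
      by_cases h : l = ""
      · simp only [pvGroups, h, reduceIte, pvGoA]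
        rw [pvGroups_append ls [g] [], List.flatMap_append, ih []]
        simp
      · simp only [pvGroups, h, reduceIte, pvGoA]
        rw [show (([g] : List (List String)).dropLast ++ [(([g] : List (List String)).getLast?.getD []) ++ [l]])
              = [g ++ [l]] from by simp,
            ih (g ++ [l])]
        simp

-- before the first blank line, the tail groups flatten to A's output with the flag unset
theorem pvGroups_drop_false (ls : List String) :
    ∀ (g : List String),
      ((pvGroups ls [g]).drop 1).flatMap (fun grp => grp.map pvParseLine) = pvGoA ls false := by
  induction ls with
  | nil => intro g; rfl
  | cons l ls ih =>
      intro g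
      by_cases h : l = ""
      · simp only [pvGroups, h, reduceIte, pvGoA]
        rw [pvGroups_append ls [g] []]
        simpa using pvGroups_flatten_true ls []
      · simp only [pvGroups, h, reduceIte, pvGoA]
        rw [show (([g] : List (List String)).dropLast ++ [(([g] : List (List String)).getLast?.getD []) ++ [l]])
              = [g ++ [l]] from by simp]
        exact ih (g ++ [l])

-- ===== VERDICT (by name: the statement is the Claim_ definition above) =====
theorem get_updates_spec : Claim_equal_get_updates := by
  intro sections _ _
  unfold Spec_get_updates get_updates get_updates_alt
  exact (pvGroups_drop_false sections []).symm
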